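-- pv_equiv track=rewrite | github.com/bioJain/python_Bioinformatics | Rosalind/bioinformatic-armory/reference.py | CheckComplement
-- ===== SOURCE A (Python) =====
-- def CheckComplement(DNAlist):
-- 	DNAdic = {'A':'T', 'T':'A', 'G':'C', 'C':'G'}
-- 	count = 0
-- 	for item in DNAlist:
-- 		DNAcompl =''
-- 		for nt in item[::-1] :
-- 			DNAcompl += DNAdic[nt]
-- 		if DNAcompl == item :
-- 			count += 1
-- 	return count
-- ===== SOURCE B (Python) =====
-- def CheckComplement(DNAlist):
--     comp = {'A': 'T', 'T': 'A', 'G': 'C', 'C': 'G'}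
--     return sum(
--         1 for item in DNAlist
--         if all(comp.get(c) == d for c, d in zip(item, reversed(item)))
--     )
-- ===== Notes on version B (the rewrite author's own statement) =====
-- stated objective: simpler
-- what changed: B drops the reverse-complement string construction entirely: instead of building item's reverse complement character by character and comparing the whole string, it counts items where every character pairs with its mirror character's complement via zip(item, reversed(item)), as a sum over a comprehension.
-- outside the precondition, e.g. on CheckComplement(['AX']): A raises KeyError, B returns 0
import Mathlib
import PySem

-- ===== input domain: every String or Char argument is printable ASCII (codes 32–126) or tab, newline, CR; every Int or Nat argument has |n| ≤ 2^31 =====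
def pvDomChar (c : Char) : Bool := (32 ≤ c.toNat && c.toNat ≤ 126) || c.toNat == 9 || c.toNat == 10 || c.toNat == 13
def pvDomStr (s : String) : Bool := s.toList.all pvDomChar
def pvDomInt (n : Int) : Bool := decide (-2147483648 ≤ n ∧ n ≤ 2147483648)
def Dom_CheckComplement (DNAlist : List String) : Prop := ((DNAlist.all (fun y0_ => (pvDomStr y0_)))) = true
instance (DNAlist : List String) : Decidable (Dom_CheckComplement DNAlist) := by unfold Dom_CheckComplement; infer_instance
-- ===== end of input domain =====

-- B drops the reverse-complement string construction: it counts items whose every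
-- character matches the complement of its mirror character (zip with the reversal); same cost, simpler.


-- ===== PORT A =====
-- DNAdic = {'A':'T', 'T':'A', 'G':'C', 'C':'G'}
def pvDNAdic : PySem.Dict Char Char :=
  PySem.Dict.ofList [('A','T'), ('T','A'), ('G','C'), ('C','G')]

-- DNAdic[nt] raises KeyError on characters outside ACGT; those inputs are excluded by
-- Pre_CheckComplement, so the '?' default of getD is never consulted inside the claim.
def CheckComplement (DNAlist : List String) : Int :=
  DNAlist.foldl (fun count item =>
    let DNAcompl : List Char :=
      item.toList.reverse.foldl (fun acc nt => acc ++ [(pvDNAdic.get? nt).getD '?']) []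
    if DNAcompl = item.toList then count + 1 else count) 0

-- ===== PORT B =====
-- comp = {'A':'T', 'T':'A', 'G':'C', 'C':'G'}
def pvComp : PySem.Dict Char Char :=
  PySem.Dict.ofList [('A','T'), ('T','A'), ('G','C'), ('C','G')]

-- sum(1 for item in DNAlist if all(comp.get(c) == d for c, d in zip(item, reversed(item))))
def CheckComplement_alt (DNAlist : List String) : Int :=
  ((DNAlist.countP (fun item =>
      (item.toList.zip item.toList.reverse).all
        (fun p => pvComp.get? p.1 == some p.2)) : Nat) : Int)

-- ===== PRECONDITION & SPEC =====
-- Pre_ excludes exactly the inputs on which A raises KeyError: a string containing a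
-- character outside {'A','T','G','C'}.
def Pre_CheckComplement (DNAlist : List String) : Prop :=
  (DNAlist.all (fun s => s.toList.all
    (fun c => c ∈ (['A','T','G','C'] : List Char)))) = true
instance (DNAlist : List String) : Decidable (Pre_CheckComplement DNAlist) := by
  unfold Pre_CheckComplement; infer_instance

def pvWitness_CheckComplement : List String := ["ACGT", "AT", "AA", "GCGC"]

def Spec_CheckComplement (DNAlist : List String) (out : Int) : Prop :=
  out = CheckComplement_alt DNAlist
instance (DNAlist : List String) (out : Int) : Decidable (Spec_CheckComplement DNAlist out) := by
  unfold Spec_CheckComplement; infer_instance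

-- ===== CLAIM (what is proved, stated in full; the proofs are below) =====
def Claim_equal_CheckComplement : Prop :=
  ∀ (DNAlist : List String), Dom_CheckComplement DNAlist →
    Pre_CheckComplement DNAlist →
    Spec_CheckComplement DNAlist (CheckComplement DNAlist)

-- ===== LEMMAS AND PROOFS =====

-- the complement function pvDNAdic / pvComp realise on ACGT
def pvFC (c : Char) : Char :=
  if c = 'A' then 'T' else if c = 'T' then 'A' else if c = 'G' then 'C' else 'G'

theorem pvDNAdic_get_of_mem {c : Char} (h : c ∈ (['A','T','G','C'] : List Char)) :
    pvDNAdic.get? c = some (pvFC c) := by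
  fin_cases h <;> decide

theorem pvComp_get_of_mem {c : Char} (h : c ∈ (['A','T','G','C'] : List Char)) :
    pvComp.get? c = some (pvFC c) := by
  fin_cases h <;> decide

-- zip-all with a total test is exactly a map equality (equal lengths)
theorem pv_zip_all_eq_map (f : Char → Char) :
    ∀ (l1 l2 : List Char), l1.length = l2.length →
      (((l1.zip l2).all (fun p => f p.1 == p.2)) = true ↔ l1.map f = l2) := by
  intro l1
  induction l1 with
  | nil => intro l2 h; cases l2 <;> simp_all
  | cons a t ih =>
    intro l2 h
    cases l2 with
    | nil => simp at h
    | cons b t2 =>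
      simp only [List.zip_cons_cons, List.all_cons, List.map_cons, Bool.and_eq_true, beq_iff_eq]
      rw [ih t2 (by simpa using h)]
      simp

-- the per-item tests of the two ports coincide on ACGT strings
theorem pv_item_eq (s : String)
    (h : ∀ c ∈ s.toList, c ∈ (['A','T','G','C'] : List Char)) :
    (decide (s.toList.reverse.foldl
        (fun acc nt => acc ++ [(pvDNAdic.get? nt).getD '?']) [] = s.toList))
    = ((s.toList.zip s.toList.reverse).all (fun p => pvComp.get? p.1 == some p.2)) := by
  have hA : s.toList.reverse.foldl
      (fun acc nt => acc ++ [(pvDNAdic.get? nt).getD '?']) ([] : List Char)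
      = s.toList.reverse.map pvFC := by
    rw [PySem.List.foldl_append_singleton_eq_map]
    simp only [List.nil_append]
    apply List.map_congr_left
    intro c hc
    rw [pvDNAdic_get_of_mem (h c (List.mem_reverse.mp hc))]
    rfl
  have hB : ((s.toList.zip s.toList.reverse).all
      (fun p => pvComp.get? p.1 == some p.2))
      = ((s.toList.zip s.toList.reverse).all (fun p => pvFC p.1 == p.2)) := by
    refine Bool.eq_iff_iff.mpr ?_
    simp only [List.all_eq_true]
    refine forall_congr' fun p => imp_congr_right fun hp => ?_
    rw [pvComp_get_of_mem (h p.1 (List.of_mem_zip hp).1)]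
    simp
  rw [hA, hB]
  rw [Bool.eq_iff_iff, decide_eq_true_iff,
    pv_zip_all_eq_map pvFC s.toList s.toList.reverse (by simp)]
  constructor
  · intro hrev
    have := congrArg List.reverse hrev
    simpa [List.map_reverse] using this
  · intro hmap
    have := congrArg List.reverse hmap
    simpa [List.map_reverse] using this

-- ===== VERDICT (by name: the statement is the Claim_ definition above) =====
theorem CheckComplement_spec : Claim_equal_CheckComplement := by
  intro l _hdom hpre
  unfold Spec_CheckComplement CheckComplement CheckComplement_alt
  rw [PySem.List.foldl_ite_add_one]
  unfold Pre_CheckComplement at hpre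
  simp only [List.all_eq_true, decide_eq_true_eq] at hpre
  have hcp := List.countP_congr (l := l)
    (p := fun item => decide (item.toList.reverse.foldl
        (fun acc nt => acc ++ [(pvDNAdic.get? nt).getD '?']) [] = item.toList))
    (q := fun item => (item.toList.zip item.toList.reverse).all
        (fun p => pvComp.get? p.1 == some p.2))
    (fun s hs => by simp only []; rw [pv_item_eq s (hpre s hs)])
  rw [zero_add, hcp]
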